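-- pv_equiv track=rewrite | github.com/hcw2155/Study | change_brackets.py | separation
-- ===== SOURCE A (Python) =====
-- def separation(s): # 분리 과정
--     cnt = [0,0]
--     result=[]
--     for i in range(0,len(s)):
--         if s[i] == '(':
--             cnt[0] += 1
--         elif s[i] == ')':
--             cnt[1] += 1
--         if cnt[0] == cnt[1]:
--             result.append(s[:i+1])
--             result.append(s[i+1:])
--             break
--     return result
-- ===== SOURCE B (Python) =====
-- def separation(s):
--     # No running tally: test each prefix independently with str.count and split at the
--     # first prefix containing equally many '(' and ')'.
--     for i in range(1, len(s) + 1):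
--         p = s[:i]
--         if p.count('(') == p.count(')'):
--             return [p, s[i:]]
--     return []
-- ===== Notes on version B (the rewrite author's own statement) =====
-- stated objective: alternative
-- what changed: A keeps a running pair of bracket tallies in one pass and breaks at the first tie; B keeps no running state at all: it tests each prefix independently with str.count and splits at the first prefix with equally many opening and closing parentheses (trading O(n) for O(n^2)).
import Mathlib
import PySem

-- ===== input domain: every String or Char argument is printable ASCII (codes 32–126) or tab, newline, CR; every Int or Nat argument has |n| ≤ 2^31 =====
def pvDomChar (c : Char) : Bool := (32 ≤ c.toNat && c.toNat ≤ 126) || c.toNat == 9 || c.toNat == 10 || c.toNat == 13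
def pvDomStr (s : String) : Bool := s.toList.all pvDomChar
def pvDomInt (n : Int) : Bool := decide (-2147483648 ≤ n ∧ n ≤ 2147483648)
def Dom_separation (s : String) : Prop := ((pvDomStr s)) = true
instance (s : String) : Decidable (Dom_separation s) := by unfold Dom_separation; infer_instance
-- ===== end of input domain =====

-- B replaces A's single pass with running bracket tallies by stateless per-prefix
-- counting: it tests each prefix with str.count and splits at the first prefix with
-- equally many '(' and ')' (alternative decomposition, O(n^2) instead of O(n)).

-- ===== PORT A =====
-- A's for-loop with break, carrying the two-element count list as a pair and result
def sepLoopA (s : String) (idxs : List Int) (cnt : Int × Int) (result : List String) : List String :=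
  match idxs with
  | [] => result
  | i :: rest =>
    match PySem.Str.pyGet? s i with
    | none => result   -- unreachable: i comes from range(0, len(s))
    | some c =>
      let cnt := if c = '(' then (cnt.1 + 1, cnt.2)
                 else if c = ')' then (cnt.1, cnt.2 + 1) else cnt
      if cnt.1 = cnt.2 then
        result ++ [PySem.Str.slice s none (some (i + 1)), PySem.Str.slice s (some (i + 1)) none]
      else sepLoopA s rest cnt result

def separation (s : String) : List String :=
  sepLoopA s (PySem.List.pyRange 0 (PySem.Str.len s)) (0, 0) []

-- ===== PORT B =====
-- B's loop over prefix lengths: slice the prefix, compare its two str.count values,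
-- return at the first hit
def sepScanB (s : String) (lens : List Int) : List String :=
  match lens with
  | [] => []
  | i :: rest =>
    let p := PySem.Str.slice s none (some i)
    if PySem.Str.count p "(" = PySem.Str.count p ")" then
      [p, PySem.Str.slice s (some i) none]
    else sepScanB s rest

def separation_alt (s : String) : List String :=
  sepScanB s (PySem.List.pyRange 1 (PySem.Str.len s + 1))

-- ===== PRECONDITION & SPEC =====
def Spec_separation (s : String) (out : List String) : Prop := out = separation_alt s
instance (s : String) (out : List String) : Decidable (Spec_separation s out) := by unfold Spec_separation; infer_instance

-- ===== CLAIM (what is proved, stated in full; the proofs are below) =====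
def Claim_equal_separation : Prop := ∀ (s : String), Dom_separation s → Spec_separation s (separation s)

-- ===== LEMMAS AND PROOFS =====

-- PySem.Chars.count with a single-character needle is List.count
lemma countGo_single (a : Char) : ∀ (l : List Char) (fuel acc : Nat), l.length ≤ fuel →
    PySem.Chars.count.go [a] fuel l acc = acc + l.count a := by
  intro l
  induction l with
  | nil =>
    intro fuel acc _
    cases fuel <;> simp [PySem.Chars.count.go]
  | cons c t ih =>
    intro fuel acc hf
    cases fuel with
    | zero => simp at hf
    | succ n =>
      have ht : t.length ≤ n := by simpa using hf
      have hpre : [a].isPrefixOf (c :: t) = (a == c) := by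
        simp [List.isPrefixOf]
      rw [PySem.Chars.count.go, hpre]
      by_cases hc : a = c
      · subst hc
        simp only [beq_self_eq_true, if_true, List.length_cons, List.length_nil,
          List.drop_succ_cons, List.drop_zero]
        rw [ih n (acc + 1) ht]
        simp
        omega
      · have hne : (a == c) = false := by simp [hc]
        rw [hne, if_neg (by simp), ih n acc ht]
        simp [Ne.symm hc]

lemma count_single (l : List Char) (a : Char) :
    PySem.Chars.count l [a] = l.count a := by
  rw [PySem.Chars.count]
  simpa using countGo_single a l l.length 0 le_rfl

-- the aligned loops: A at absolute index k with tallies equal to the counts of the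
-- length-k prefix; B at prefix length k+1
lemma loops_eq (s : String) : ∀ (suf : List Char) (k : Nat) (cnt : Int × Int),
    s.toList.drop k = suf →
    cnt.1 = ((s.toList.take k).count '(' : Int) →
    cnt.2 = ((s.toList.take k).count ')' : Int) →
    sepLoopA s (PySem.List.pyRange (k : Int) (PySem.Str.len s)) cnt []
      = sepScanB s (PySem.List.pyRange ((k : Int) + 1) (PySem.Str.len s + 1)) := by
  intro suf
  induction suf with
  | nil =>
    intro k cnt h _ _
    have hk : s.toList.length ≤ k := by
      by_contra hlt
      have := List.drop_eq_nil_iff.mp h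
      omega
    have hlen : PySem.Str.len s ≤ (k : Int) := by
      simp [PySem.Str.len_eq]; exact_mod_cast hk
    rw [PySem.List.pyRange_one_eq_nil hlen,
        PySem.List.pyRange_one_eq_nil (by omega)]
    rfl
  | cons c rest ih =>
    intro k cnt h hc1 hc2
    have hk : k < s.toList.length := by
      by_contra hge
      rw [List.drop_eq_nil_iff.mpr (by omega)] at h
      simp at h
    have hget : s.toList[k]? = some c := by
      have h0 : (s.toList.drop k)[0]? = s.toList[k + 0]? := List.getElem?_drop
      rw [h] at h0
      simpa using h0.symm
    have hrest : s.toList.drop (k + 1) = rest := by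
      have hdd : (s.toList.drop k).drop 1 = s.toList.drop (k + 1) := List.drop_drop
      rw [h] at hdd
      simp only [List.drop_succ_cons, List.drop_zero] at hdd
      exact hdd.symm
    have hklt : (k : Int) < PySem.Str.len s := by
      simp [PySem.Str.len_eq]; exact_mod_cast hk
    have htake : s.toList.take (k + 1) = s.toList.take k ++ [c] := by
      rw [List.take_add_one, hget]; rfl
    -- unfold one step of each loop
    rw [PySem.List.pyRange_one_cons hklt,
        PySem.List.pyRange_one_cons (a := (k : Int) + 1) (b := PySem.Str.len s + 1) (by omega)]
    rw [sepLoopA, sepScanB.eq_def]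
    rw [show PySem.Str.pyGet? s (k : Int) = some c by simp [hget]]
    dsimp only
    -- B's prefix for i = k+1 is take (k+1)
    have htn : ((k : Int) + 1).toNat = k + 1 := by omega
    have hp : (PySem.Str.slice s none (some ((k : Int) + 1))).toList = s.toList.take (k + 1) := by
      rw [PySem.Str.toList_slice, PySem.Chars.slice_eq_listSlice,
          PySem.List.slice_to (xs := s.toList) (b := (k : Int) + 1) (by omega), htn]
    -- B's condition in terms of List.count on take (k+1)
    have hL : ("(" : String).toList = ['('] := rfl
    have hR : (")" : String).toList = [')'] := rfl
    have hcntL : PySem.Str.count (PySem.Str.slice s none (some ((k : Int) + 1))) "("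
        = (s.toList.take (k + 1)).count '(' := by
      rw [PySem.Str.count_eq, hp, hL]; exact count_single _ _
    have hcntR : PySem.Str.count (PySem.Str.slice s none (some ((k : Int) + 1))) ")"
        = (s.toList.take (k + 1)).count ')' := by
      rw [PySem.Str.count_eq, hp, hR]; exact count_single _ _
    set cnt' : Int × Int := if c = '(' then (cnt.1 + 1, cnt.2)
        else if c = ')' then (cnt.1, cnt.2 + 1) else cnt with hcnt'
    have h1 : cnt'.1 = ((s.toList.take (k + 1)).count '(' : Int) := by
      rw [htake, List.count_append, hcnt']
      by_cases e1 : c = '(' <;> by_cases e2 : c = ')' <;>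
        simp [e1, e2, hc1]
    have h2 : cnt'.2 = ((s.toList.take (k + 1)).count ')' : Int) := by
      rw [htake, List.count_append, hcnt']
      by_cases e1 : c = '(' <;> by_cases e2 : c = ')' <;>
        simp [e1, e2, hc2]
    by_cases heq : cnt'.1 = cnt'.2
    · rw [if_pos heq, if_pos (by rw [hcntL, hcntR]; exact_mod_cast (h1 ▸ h2 ▸ heq))]
      simp
    · rw [if_neg heq,
          if_neg (by rw [hcntL, hcntR]; exact fun hh => heq (by rw [h1, h2]; exact_mod_cast hh))]
      have := ih (k + 1) cnt' hrest (by rw [h1]) (by rw [h2])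
      push_cast at this ⊢
      exact this

-- ===== VERDICT (by name: the statement is the Claim_ definition above) =====
theorem separation_spec : Claim_equal_separation := by
  intro s _
  unfold Spec_separation separation separation_alt
  have h := loops_eq s s.toList 0 (0, 0) (by simp) (by simp) (by simp)
  simpa using h
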